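-- pv_equiv track=rewrite | github.com/Dario-Evangelista/Bot-telegram | src/funcoes.py | calculo_preco
-- ===== SOURCE A (Python) =====
-- def calculo_preco(pedido,preco_frete):
--     p_hamburguer = 20
--     p_big = 10
--     p_pizza = 25
--     p_Piz2 = 42
--     p_refri = 2
--     p_refri2 = 5
--     frete = preco_frete
--     valor_total = 0
--
--     for item in pedido:
--         if item == "Mac":
--             valor_total += p_hamburguer
--         if item == "Big":
--             valor_total += p_big
--         if item == "Piz":
--             valor_total += p_pizza
--         if item == "Piz2":
--             valor_total += p_Piz2
--         if item == "tip1":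
--             valor_total += p_refri
--         if item == "tip2":
--             valor_total += p_refri2
--         if item == "frete":
--             valor_total += frete
--
--     return valor_total,frete
-- ===== SOURCE B (Python) =====
-- def calculo_preco(pedido, preco_frete):
--     # Count each item once, then weight a price table by the counts.
--     counts = {}
--     for item in pedido:
--         counts[item] = counts.get(item, 0) + 1
--     prices = {"Mac": 20, "Big": 10, "Piz": 25, "Piz2": 42,
--               "tip1": 2, "tip2": 5, "frete": preco_frete}
--     valor_total = 0
--     for name, price in prices.items():
--         valor_total += price * counts.get(name, 0)
--     return valor_total, preco_frete
-- ===== Notes on version B (the rewrite author's own statement) =====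
-- stated objective: alternative
-- what changed: B builds a frequency table of the order in one pass and then sums price*count over the seven distinct price-table entries, instead of A's per-element chain of equality tests.
import Mathlib
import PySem

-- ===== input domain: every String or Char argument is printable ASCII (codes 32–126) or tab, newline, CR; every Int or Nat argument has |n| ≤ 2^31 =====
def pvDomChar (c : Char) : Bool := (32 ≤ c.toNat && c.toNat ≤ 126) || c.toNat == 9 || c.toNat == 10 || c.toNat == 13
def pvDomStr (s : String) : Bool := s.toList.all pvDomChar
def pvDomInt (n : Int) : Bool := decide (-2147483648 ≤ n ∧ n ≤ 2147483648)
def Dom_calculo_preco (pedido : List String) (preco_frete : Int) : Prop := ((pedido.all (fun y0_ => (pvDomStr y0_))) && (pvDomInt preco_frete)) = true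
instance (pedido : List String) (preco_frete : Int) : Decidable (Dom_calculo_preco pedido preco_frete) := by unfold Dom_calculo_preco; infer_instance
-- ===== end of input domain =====

-- B counts the order once and sums price*count over the distinct price-table entries,
-- instead of A's per-element chain of equality tests (alternative decomposition, same cost).


-- ===== PORT A =====
-- one step of A's loop body: the seven successive `if` tests, in order
def calculo_preco_step (frete : Int) (valor_total : Int) (item : String) : Int :=
  let valor_total := if item == "Mac" then valor_total + 20 else valor_total
  let valor_total := if item == "Big" then valor_total + 10 else valor_total
  let valor_total := if item == "Piz" then valor_total + 25 else valor_total
  let valor_total := if item == "Piz2" then valor_total + 42 else valor_total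
  let valor_total := if item == "tip1" then valor_total + 2 else valor_total
  let valor_total := if item == "tip2" then valor_total + 5 else valor_total
  let valor_total := if item == "frete" then valor_total + frete else valor_total
  valor_total

def calculo_preco (pedido : List String) (preco_frete : Int) : Int × Int :=
  let frete := preco_frete
  let valor_total := pedido.foldl (calculo_preco_step frete) 0
  (valor_total, frete)

-- ===== PORT B =====
def calculo_preco_alt (pedido : List String) (preco_frete : Int) : Int × Int :=
  let counts : PySem.Dict String Int :=
    pedido.foldl (fun d item => d.insert item (d.getD item 0 + 1)) PySem.Dict.empty
  let prices : PySem.Dict String Int :=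
    PySem.Dict.ofList [("Mac", 20), ("Big", 10), ("Piz", 25), ("Piz2", 42),
                       ("tip1", 2), ("tip2", 5), ("frete", preco_frete)]
  let valor_total := prices.items.foldl (fun acc p => acc + p.2 * counts.getD p.1 0) 0
  (valor_total, preco_frete)

-- ===== PRECONDITION & SPEC =====
def Spec_calculo_preco (pedido : List String) (preco_frete : Int) (out : Int × Int) : Prop := out = calculo_preco_alt pedido preco_frete
instance (pedido : List String) (preco_frete : Int) (out : Int × Int) : Decidable (Spec_calculo_preco pedido preco_frete out) := by unfold Spec_calculo_preco; infer_instance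

-- ===== CLAIM (what is proved, stated in full; the proofs are below) =====
def Claim_equal_calculo_preco : Prop := ∀ (pedido : List String) (preco_frete : Int), Dom_calculo_preco pedido preco_frete → Spec_calculo_preco pedido preco_frete (calculo_preco pedido preco_frete)

-- ===== LEMMAS AND PROOFS =====

-- the count-weighted sum both programs compute
def pvSum (pedido : List String) (frete : Int) : Int :=
  20 * pedido.count "Mac" + 10 * pedido.count "Big" + 25 * pedido.count "Piz" +
  42 * pedido.count "Piz2" + 2 * pedido.count "tip1" + 5 * pedido.count "tip2" +
  frete * pedido.count "frete"

set_option maxHeartbeats 1000000 in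
theorem calculo_preco_step_shift (frete acc : Int) (x : String) :
    calculo_preco_step frete acc x = acc + calculo_preco_step frete 0 x := by
  simp only [calculo_preco_step]
  split_ifs <;> ring

set_option maxHeartbeats 1000000 in
theorem foldl_step_eq_pvSum (frete : Int) (pedido : List String) (acc : Int) :
    pedido.foldl (calculo_preco_step frete) acc = acc + pvSum pedido frete := by
  induction pedido generalizing acc with
  | nil => simp [pvSum]
  | cons x xs ih =>
    rw [List.foldl_cons, ih, calculo_preco_step_shift]
    simp only [pvSum, calculo_preco_step, List.count_cons]
    split_ifs with h1 h2 h3 h4 h5 h6 h7 <;>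
      simp_all [beq_iff_eq] <;> ring

theorem alt_eq_pvSum (pedido : List String) (frete : Int) :
    calculo_preco_alt pedido frete = (pvSum pedido frete, frete) := by
  simp only [calculo_preco_alt, PySem.Dict.foldl_insert_getD_add_one_eq_counter]
  have hitems : (PySem.Dict.ofList [("Mac", (20:Int)), ("Big", 10), ("Piz", 25), ("Piz2", 42),
      ("tip1", 2), ("tip2", 5), ("frete", frete)]).items
      = [("Mac", (20:Int)), ("Big", 10), ("Piz", 25), ("Piz2", 42),
         ("tip1", 2), ("tip2", 5), ("frete", frete)] := by
    rfl
  rw [hitems]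
  simp only [List.foldl_cons, List.foldl_nil, PySem.Dict.getD_counter, pvSum]
  ring_nf

-- ===== VERDICT (by name: the statement is the Claim_ definition above) =====
theorem calculo_preco_spec : Claim_equal_calculo_preco := by
  intro pedido preco_frete _
  unfold Spec_calculo_preco
  rw [alt_eq_pvSum]
  simp only [calculo_preco]
  rw [foldl_step_eq_pvSum]
  simp
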